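-- pv_equiv track=rewrite | github.com/Reedov/agregator | apps/tasks/fetch_bs.py | ordhash
-- ===== SOURCE A (Python) =====
-- def ordhash(string):
--     ord_lst = [ord(x) for x in string]
--     sum = sum1 = sum2 = 0
--     for index,item in enumerate(ord_lst):
--         if (index // 2) == 0:
--             sum1 -= item**2 + index
--         else:
--             sum2 += item**2 + index
--         sum += sum1+sum2
--     return sum
-- ===== SOURCE B (Python) =====
-- def ordhash(string):
--     n = len(string)
--     total = 0
--     for i, ch in enumerate(string):
--         term = ord(ch) ** 2 + i
--         total += (-term if i < 2 else term) * (n - i)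
--     return total
-- ===== Notes on version B (the rewrite author's own statement) =====
-- stated objective: simpler
-- what changed: Replaced the three accumulators (sum1/sum2 and the running-sum-of-running-sums) by a single pass that adds each term directly with its multiplicity (n-i), negated for indices 0 and 1.
import Mathlib
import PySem

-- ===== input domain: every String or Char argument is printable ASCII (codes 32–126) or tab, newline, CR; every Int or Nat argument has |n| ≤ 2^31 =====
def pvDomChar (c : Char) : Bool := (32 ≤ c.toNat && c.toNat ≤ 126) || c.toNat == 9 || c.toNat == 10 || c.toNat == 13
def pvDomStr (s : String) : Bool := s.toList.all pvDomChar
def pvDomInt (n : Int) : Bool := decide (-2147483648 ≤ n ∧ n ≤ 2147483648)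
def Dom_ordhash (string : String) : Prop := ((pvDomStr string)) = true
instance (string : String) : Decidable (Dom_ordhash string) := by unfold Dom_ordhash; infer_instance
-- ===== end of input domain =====

-- B replaces A's twin accumulators and running-sum-of-running-sums by one pass adding each term with multiplicity (n-i); objective: simpler.

-- ===== PORT A =====
def ordhash (string : String) : Int :=
  let ord_lst := string.toList.map (fun c => (c.toNat : Int))
  let st := (PySem.List.enumerate ord_lst 0).foldl
    (fun (acc : Int × Int × Int) p =>
      if PySem.Int.floordiv p.1 2 = 0 then
        (acc.1 + (acc.2.1 - (p.2 ^ 2 + p.1)) + acc.2.2, acc.2.1 - (p.2 ^ 2 + p.1), acc.2.2)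
      else
        (acc.1 + acc.2.1 + (acc.2.2 + (p.2 ^ 2 + p.1)), acc.2.1, acc.2.2 + (p.2 ^ 2 + p.1)))
    (0, 0, 0)
  st.1

-- ===== PORT B =====
def ordhash_alt (string : String) : Int :=
  let n : Int := string.toList.length
  (PySem.List.enumerate string.toList 0).foldl
    (fun total p =>
      let term : Int := ((p.2.toNat : Int)) ^ 2 + p.1
      total + (if p.1 < 2 then -term else term) * (n - p.1))
    0

-- ===== PRECONDITION & SPEC =====
def Spec_ordhash (string : String) (out : Int) : Prop := out = ordhash_alt string
instance (string : String) (out : Int) : Decidable (Spec_ordhash string out) := by unfold Spec_ordhash; infer_instance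

-- ===== CLAIM (what is proved, stated in full; the proofs are below) =====
def Claim_equal_ordhash : Prop := ∀ (string : String), Dom_ordhash string → Spec_ordhash string (ordhash string)

-- ===== LEMMAS AND PROOFS =====

-- weighted-term sum both results reduce to: term at absolute index k gets weight (length of remainder)
def pvS (k : Nat) : List Char → Int
  | [] => 0
  | c :: cs =>
      ((cs.length : Int) + 1) * (if k < 2 then -(((c.toNat : Int)) ^ 2 + k) else ((c.toNat : Int)) ^ 2 + k)
      + pvS (k + 1) cs

theorem pvA_foldl (l : List Char) (k : Nat) (s s1 s2 : Int) :
    ((PySem.List.enumerate (l.map (fun c => (c.toNat : Int))) (k : Int)).foldl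
      (fun (acc : Int × Int × Int) p =>
        if PySem.Int.floordiv p.1 2 = 0 then
          (acc.1 + (acc.2.1 - (p.2 ^ 2 + p.1)) + acc.2.2, acc.2.1 - (p.2 ^ 2 + p.1), acc.2.2)
        else
          (acc.1 + acc.2.1 + (acc.2.2 + (p.2 ^ 2 + p.1)), acc.2.1, acc.2.2 + (p.2 ^ 2 + p.1)))
      (s, s1, s2)).1
    = s + (l.length : Int) * (s1 + s2) + pvS k l := by
  induction l generalizing k s s1 s2 with
  | nil => simp [PySem.List.enumerate_nil, pvS]
  | cons c cs ih =>
      have hfd : PySem.Int.floordiv (k : Int) 2 = ((k / 2 : Nat) : Int) :=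
        PySem.Int.floordiv_natCast k 2
      by_cases hk : k < 2
      · have h0 : PySem.Int.floordiv (k : Int) 2 = 0 := by
          rw [hfd]; have : k / 2 = 0 := by omega
          simp [this]
        simp only [List.map_cons, PySem.List.enumerate_cons, List.foldl_cons, h0]
        rw [show ((k : Int) + 1) = ((k + 1 : Nat) : Int) by push_cast; ring]
        rw [ih]
        simp only [pvS, if_pos hk, List.length_cons]
        push_cast; ring
      · have h0 : ¬ PySem.Int.floordiv (k : Int) 2 = 0 := by
          rw [hfd]; exact_mod_cast (by omega : k / 2 ≠ 0)
        simp only [List.map_cons, PySem.List.enumerate_cons, List.foldl_cons, if_neg h0]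
        rw [show ((k : Int) + 1) = ((k + 1 : Nat) : Int) by push_cast; ring]
        rw [ih]
        simp only [pvS, if_neg hk, List.length_cons]
        push_cast; ring

theorem pvB_foldl (l : List Char) (k : Nat) (n acc : Int) (hn : n = (k : Int) + l.length) :
    (PySem.List.enumerate l (k : Int)).foldl
      (fun total p =>
        let term : Int := ((p.2.toNat : Int)) ^ 2 + p.1
        total + (if p.1 < 2 then -term else term) * (n - p.1))
      acc
    = acc + pvS k l := by
  induction l generalizing k acc with
  | nil => simp [PySem.List.enumerate_nil, pvS]
  | cons c cs ih =>
      simp only [PySem.List.enumerate_cons, List.foldl_cons]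
      rw [show ((k : Int) + 1) = ((k + 1 : Nat) : Int) by push_cast; ring]
      rw [ih (k + 1) _ (by rw [hn]; push_cast [List.length_cons]; ring)]
      simp only [pvS]
      by_cases hk : k < 2
      · rw [if_pos (by exact_mod_cast hk), if_pos hk]
        have hw : n - (k : Int) = (cs.length : Int) + 1 := by
          rw [hn]; push_cast [List.length_cons]; ring
        rw [hw]; ring
      · rw [if_neg (by exact_mod_cast hk), if_neg hk]
        have hw : n - (k : Int) = (cs.length : Int) + 1 := by
          rw [hn]; push_cast [List.length_cons]; ring
        rw [hw]; ring

-- ===== VERDICT (by name: the statement is the Claim_ definition above) =====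
theorem ordhash_spec : Claim_equal_ordhash := by
  intro string _
  unfold Spec_ordhash ordhash ordhash_alt
  have hA := pvA_foldl string.toList 0 0 0 0
  have hB := pvB_foldl string.toList 0 (string.toList.length : Int) 0 (by simp)
  simp only [Nat.cast_zero] at hA hB
  simp only []
  rw [hA, hB]
  ring
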